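-- pv_equiv track=rewrite | github.com/WAR885/Datathon-2025 | calculate_total.py | calculate_total_ingredient_popularities
-- ===== SOURCE A (Python) =====
-- def calculate_total_ingredient_popularities(all_month_ingredient_popularities:list[dict]):
--     ingredient_popularity = {}
--     for i in range(len(all_month_ingredient_popularities)):
--         for item in all_month_ingredient_popularities[i].keys():
--             ingredient_popularity[item] = 0
--     for month_item_pop in all_month_ingredient_popularities:
--         for item in month_item_pop.keys():
--             ingredient_popularity[item] += month_item_pop[item]
--     #Data looks sus, check tomorrow
--     return ingredient_popularity
-- ===== SOURCE B (Python) =====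
-- def calculate_total_ingredient_popularities(all_month_ingredient_popularities: list[dict]):
--     # Group-by then reduce: collect each ingredient's per-month contributions
--     # into a list, then sum each list at the end.
--     contributions = {}
--     for month in all_month_ingredient_popularities:
--         for item, pop in month.items():
--             contributions.setdefault(item, []).append(pop)
--     return {item: sum(pops) for item, pops in contributions.items()}
-- ===== Notes on version B (the rewrite author's own statement) =====
-- stated objective: alternative
-- what changed: Replaces A's two-phase running-sum accumulation (zero-init pass, then in-place += per item) by a group-by-then-reduce: one pass collects each ingredient's per-month contributions into a list keyed by ingredient, and a final comprehension sums each list.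
import Mathlib
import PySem

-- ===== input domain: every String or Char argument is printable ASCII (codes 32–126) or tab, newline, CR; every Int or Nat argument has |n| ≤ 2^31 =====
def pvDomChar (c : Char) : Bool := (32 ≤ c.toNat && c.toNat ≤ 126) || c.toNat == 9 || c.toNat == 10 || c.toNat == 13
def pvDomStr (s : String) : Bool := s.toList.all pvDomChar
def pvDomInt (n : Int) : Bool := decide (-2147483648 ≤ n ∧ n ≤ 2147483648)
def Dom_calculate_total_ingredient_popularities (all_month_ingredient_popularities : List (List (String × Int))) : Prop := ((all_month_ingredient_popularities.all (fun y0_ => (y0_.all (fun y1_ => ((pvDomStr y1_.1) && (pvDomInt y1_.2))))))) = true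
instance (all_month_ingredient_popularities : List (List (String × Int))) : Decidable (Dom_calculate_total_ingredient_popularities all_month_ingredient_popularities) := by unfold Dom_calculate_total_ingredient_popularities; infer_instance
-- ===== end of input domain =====

-- B replaces A's two-phase running-sum accumulation by a group-by-then-reduce:
-- collect each key's per-month contributions into a list, then sum each list.

-- ===== PORT A =====
-- A: first loop 'for i in range(len(..)): for item in ..[i].keys(): d[item] = 0',
-- then 'for month_item_pop in ..: for item in month_item_pop.keys(): d[item] += month_item_pop[item]'.
-- 'd[item] +=' is ported as insert with getD 0: item is always present (phase 1 put it there),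
-- and 'month_item_pop[item]' with item drawn from its keys is exactly getD 0 — exact, no KeyError possible.
def calculate_total_ingredient_popularities (all_month_ingredient_popularities : List (List (String × Int))) : List (String × Int) :=
  let d0 : PySem.Dict String Int :=
    (PySem.List.pyRange 0 (all_month_ingredient_popularities.length : Int) 1).foldl
      (fun d i =>
        ((PySem.Dict.ofList (PySem.List.pyGetD all_month_ingredient_popularities i [])).keys).foldl
          (fun d item => d.insert item 0) d)
      PySem.Dict.empty
  let d1 : PySem.Dict String Int :=
    all_month_ingredient_popularities.foldl
      (fun d month_item_pop =>
        let md := PySem.Dict.ofList month_item_pop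
        md.keys.foldl (fun d item => d.insert item (d.getD item 0 + md.getD item 0)) d)
      d0
  d1.items

-- ===== PORT B =====
-- B: 'contributions = {}; for month in ..: for item, pop in month.items():
--     contributions.setdefault(item, []).append(pop)' — setdefault+append mutates the stored
-- list, i.e. d[item] = d.get(item, []) + [pop], ported exactly as Dict.modify item [] (· ++ [pop]);
-- then '{item: sum(pops) for item, pops in contributions.items()}' — a comprehension over a
-- dict's items (keys distinct), ported as a map over .items.
def calculate_total_ingredient_popularities_alt (all_month_ingredient_popularities : List (List (String × Int))) : List (String × Int) :=
  let contributions : PySem.Dict String (List Int) :=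
    all_month_ingredient_popularities.foldl
      (fun contributions month =>
        (PySem.Dict.ofList month).items.foldl
          (fun contributions p => contributions.modify p.1 [] (fun pops => pops ++ [p.2]))
          contributions)
      PySem.Dict.empty
  contributions.items.map (fun p => (p.1, p.2.sum))

-- ===== PRECONDITION & SPEC =====
def Spec_calculate_total_ingredient_popularities (all_month_ingredient_popularities : List (List (String × Int))) (out : List (String × Int)) : Prop := out = calculate_total_ingredient_popularities_alt all_month_ingredient_popularities
instance (all_month_ingredient_popularities : List (List (String × Int))) (out : List (String × Int)) : Decidable (Spec_calculate_total_ingredient_popularities all_month_ingredient_popularities out) := by unfold Spec_calculate_total_ingredient_popularities; infer_instance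

-- ===== CLAIM (what is proved, stated in full; the proofs are below) =====
def Claim_equal_calculate_total_ingredient_popularities : Prop := ∀ (all_month_ingredient_popularities : List (List (String × Int))), Dom_calculate_total_ingredient_popularities all_month_ingredient_popularities → Spec_calculate_total_ingredient_popularities all_month_ingredient_popularities (calculate_total_ingredient_popularities all_month_ingredient_popularities)

-- ===== LEMMAS AND PROOFS =====

-- A's second (accumulation) pass over one month, as a step function.
def pvStep2 (d : PySem.Dict String Int) (m : List (String × Int)) : PySem.Dict String Int :=
  let md := PySem.Dict.ofList m
  md.keys.foldl (fun d item => d.insert item (d.getD item 0 + md.getD item 0)) d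

-- A's first (zero-init) pass over one month, as a step function.
def pvStep1 (d : PySem.Dict String Int) (m : List (String × Int)) : PySem.Dict String Int :=
  (PySem.Dict.ofList m).keys.foldl (fun d item => d.insert item 0) d

-- total contribution of all months to key k
def pvTotal (ms : List (List (String × Int))) (k : String) : Int :=
  (ms.map (fun m => (PySem.Dict.ofList m).getD k 0)).sum

-- first-occurrence key order accumulated over months
def pvKeys (s : PySem.Set String) (ms : List (List (String × Int))) : PySem.Set String :=
  ms.foldl (fun s m => PySem.Set.update s (PySem.Dict.ofList m).keys) s

theorem pvA_eq (ms : List (List (String × Int))) :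
    calculate_total_ingredient_popularities ms
      = (ms.foldl pvStep2 (ms.foldl pvStep1 PySem.Dict.empty)).items := by
  unfold calculate_total_ingredient_popularities
  exact congrArg (fun d => (List.foldl pvStep2 d ms).items)
    (PySem.List.foldl_pyRange_zero_pyGetD' ms ([] : List (String × Int))
      (fun (d : PySem.Dict String Int) m => ((PySem.Dict.ofList m).keys).foldl (fun d item => d.insert item 0) d)
      PySem.Dict.empty)

-- getD after one accumulation inner loop over a Nodup key list
theorem pv_getD_innerAcc (l : List String) (hl : l.Nodup) (c : String → Int)
    (d : PySem.Dict String Int) (k : String) :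
    (l.foldl (fun d k' => d.insert k' (d.getD k' 0 + c k')) d).getD k 0
      = d.getD k 0 + (if k ∈ l then c k else 0) := by
  induction l generalizing d with
  | nil => simp
  | cons a l ih =>
    simp only [List.foldl_cons]
    rw [ih (List.nodup_cons.mp hl).2, PySem.Dict.getD_insert]
    by_cases hk : k = a
    · subst hk
      have hnot : k ∉ l := (List.nodup_cons.mp hl).1
      simp [hnot]
    · simp [hk, List.mem_cons]

theorem pv_getD_step2 (ms : List (List (String × Int))) (d : PySem.Dict String Int) (k : String) :
    (ms.foldl pvStep2 d).getD k 0 = d.getD k 0 + pvTotal ms k := by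
  induction ms generalizing d with
  | nil => simp [pvTotal]
  | cons m ms ih =>
    simp only [List.foldl_cons]
    rw [ih]
    have hstep : (pvStep2 d m).getD k 0 = d.getD k 0 + (PySem.Dict.ofList m).getD k 0 := by
      unfold pvStep2
      rw [pv_getD_innerAcc (PySem.Dict.ofList m).keys (PySem.Dict.nodup_keys_ofList m)
        (fun item => (PySem.Dict.ofList m).getD item 0) d k]
      by_cases hk : k ∈ (PySem.Dict.ofList m).keys
      · simp [hk]
      · have hc : (PySem.Dict.ofList m).contains k = false := by
          by_contra hcc
          exact hk (((PySem.Dict.ofList m).contains_iff_mem_keys k).mp (by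
            cases h : (PySem.Dict.ofList m).contains k with
            | true => rfl
            | false => exact absurd h hcc))
        rw [PySem.Dict.getD_of_not_contains _ 0 hc]
        simp [hk]
    rw [hstep, pvTotal, pvTotal]
    simp [add_assoc]

-- the zero-init inner loop keeps every getD-with-default-0 at 0
theorem pv_getD_inner_zero (l : List String) (d : PySem.Dict String Int) (k : String)
    (h : d.getD k 0 = 0) : (l.foldl (fun d k' => d.insert k' 0) d).getD k 0 = 0 := by
  induction l generalizing d with
  | nil => simpa using h
  | cons a l ih =>
    simp only [List.foldl_cons]
    apply ih
    rw [PySem.Dict.getD_insert]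
    split_ifs <;> simp [h]

theorem pv_getD_step1 (ms : List (List (String × Int))) (d : PySem.Dict String Int) (k : String)
    (h : d.getD k 0 = 0) : (ms.foldl pvStep1 d).getD k 0 = 0 := by
  induction ms generalizing d with
  | nil => simpa using h
  | cons m ms ih =>
    simp only [List.foldl_cons]
    apply ih
    unfold pvStep1
    exact pv_getD_inner_zero _ _ _ h

theorem pv_keys_step2 (ms : List (List (String × Int))) (d : PySem.Dict String Int) :
    (ms.foldl pvStep2 d).keys = pvKeys d.keys ms := by
  induction ms generalizing d with
  | nil => rfl
  | cons m ms ih =>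
    simp only [List.foldl_cons]
    rw [ih, show (pvStep2 d m).keys = PySem.Set.update d.keys (PySem.Dict.ofList m).keys from by
      unfold pvStep2
      exact PySem.Dict.keys_foldl_insert _ _ _]
    rfl

theorem pv_keys_step1 (ms : List (List (String × Int))) (d : PySem.Dict String Int) :
    (ms.foldl pvStep1 d).keys = pvKeys d.keys ms := by
  induction ms generalizing d with
  | nil => rfl
  | cons m ms ih =>
    simp only [List.foldl_cons]
    rw [ih, show (pvStep1 d m).keys = PySem.Set.update d.keys (PySem.Dict.ofList m).keys from by
      unfold pvStep1
      exact PySem.Dict.keys_foldl_insert _ (fun _ _ => 0) _]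
    rfl

theorem pv_mem_pvKeys (ms : List (List (String × Int))) (s : PySem.Set String) (x : String)
    (h : x ∈ s) : x ∈ pvKeys s ms := by
  induction ms generalizing s with
  | nil => exact h
  | cons m ms ih =>
    simp only [pvKeys, List.foldl_cons]
    exact ih _ ((PySem.Set.mem_update _ _ _).mpr (Or.inl h))

theorem pv_mem_pvKeys_of_mem (ms : List (List (String × Int))) (s : PySem.Set String)
    (m : List (String × Int)) (hm : m ∈ ms) (x : String)
    (hx : x ∈ (PySem.Dict.ofList m).keys) : x ∈ pvKeys s ms := by
  induction ms generalizing s with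
  | nil => cases hm
  | cons m' ms ih =>
    simp only [pvKeys, List.foldl_cons]
    rcases List.mem_cons.mp hm with h | h
    · subst h
      exact pv_mem_pvKeys ms _ x ((PySem.Set.mem_update _ _ _).mpr (Or.inr hx))
    · exact ih _ h

theorem pv_pvKeys_idem (ms : List (List (String × Int))) (s : PySem.Set String)
    (h : ∀ m ∈ ms, ∀ x ∈ (PySem.Dict.ofList m).keys, x ∈ s) : pvKeys s ms = s := by
  induction ms generalizing s with
  | nil => rfl
  | cons m ms ih =>
    simp only [pvKeys, List.foldl_cons]
    have hu : PySem.Set.update s (PySem.Dict.ofList m).keys = s := by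
      rw [PySem.Set.update_eq_append_filter]
      have hnil : List.filter (fun y => !PySem.Set.contains s y)
          (PySem.Set.ofList (PySem.Dict.ofList m).keys) = [] := by
        rw [List.filter_eq_nil_iff]
        intro y hy
        have hys : y ∈ s := h m List.mem_cons_self y ((PySem.Set.mem_ofList _ _).mp hy)
        simp [hys]
      rw [hnil, List.append_nil]
    rw [hu]
    exact ih s (fun m' hm' x hx => h m' (List.mem_cons_of_mem _ hm') x hx)

theorem pv_nodup_step2 (ms : List (List (String × Int))) (d : PySem.Dict String Int)
    (h : d.keys.Nodup) : (ms.foldl pvStep2 d).keys.Nodup := by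
  induction ms generalizing d with
  | nil => exact h
  | cons m ms ih =>
    simp only [List.foldl_cons]
    apply ih
    unfold pvStep2
    exact PySem.Dict.nodup_keys_foldl_insert _ _ _ h

theorem pv_nodup_step1 (ms : List (List (String × Int))) (d : PySem.Dict String Int)
    (h : d.keys.Nodup) : (ms.foldl pvStep1 d).keys.Nodup := by
  induction ms generalizing d with
  | nil => exact h
  | cons m ms ih =>
    simp only [List.foldl_cons]
    apply ih
    unfold pvStep1
    exact PySem.Dict.nodup_keys_foldl_insert _ (fun _ _ => 0) _ h

-- B's grouping pass over one month, as a step function.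
def pvStepB (g : PySem.Dict String (List Int)) (m : List (String × Int)) : PySem.Dict String (List Int) :=
  (PySem.Dict.ofList m).items.foldl (fun g p => g.modify p.1 [] (fun pops => pops ++ [p.2])) g

-- the per-month contributions of key k, in month order
def pvContrib (ms : List (List (String × Int))) (k : String) : List Int :=
  ms.flatMap (fun m =>
    if (PySem.Dict.ofList m).contains k then [(PySem.Dict.ofList m).getD k 0] else [])

theorem pv_filter_map (ks : List String) (hnd : ks.Nodup) (f : String → Int) (k : String) :
    (((ks.map (fun k' => (k', f k'))).filter (fun p => p.1 == k)).map (fun p => p.2))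
      = if k ∈ ks then [f k] else [] := by
  induction ks with
  | nil => simp
  | cons a ks ih =>
    simp only [List.map_cons, List.filter_cons]
    by_cases hk : a = k
    · subst hk
      have hnot : a ∉ ks := (List.nodup_cons.mp hnd).1
      simp [ih (List.nodup_cons.mp hnd).2, hnot]
    · have : k ≠ a := fun h => hk h.symm
      simp [ih (List.nodup_cons.mp hnd).2, hk, this]

theorem pv_getD_stepB (g : PySem.Dict String (List Int)) (m : List (String × Int)) (k : String) :
    (pvStepB g m).getD k []
      = g.getD k []
          ++ (if (PySem.Dict.ofList m).contains k then [(PySem.Dict.ofList m).getD k 0] else []) := by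
  unfold pvStepB
  rw [PySem.Dict.getD_foldl_modify_append]
  congr 1
  rw [PySem.Dict.items_eq_map_keys _ (PySem.Dict.nodup_keys_ofList m) 0,
      pv_filter_map _ (PySem.Dict.nodup_keys_ofList m)]
  by_cases hmem : k ∈ (PySem.Dict.ofList m).keys
  · simp [hmem, ((PySem.Dict.ofList m).contains_iff_mem_keys k).mpr hmem]
  · have hc : (PySem.Dict.ofList m).contains k = false := by
      cases h : (PySem.Dict.ofList m).contains k with
      | true => exact absurd (((PySem.Dict.ofList m).contains_iff_mem_keys k).mp h) hmem
      | false => rfl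
    simp [hmem, hc]

theorem pv_getD_groups (ms : List (List (String × Int))) (g : PySem.Dict String (List Int))
    (k : String) : (ms.foldl pvStepB g).getD k [] = g.getD k [] ++ pvContrib ms k := by
  induction ms generalizing g with
  | nil => simp [pvContrib]
  | cons m ms ih =>
    simp only [List.foldl_cons]
    rw [ih, pv_getD_stepB]
    simp only [pvContrib, List.flatMap_cons]
    rw [List.append_assoc]

theorem pv_keys_groups (ms : List (List (String × Int))) (g : PySem.Dict String (List Int)) :
    (ms.foldl pvStepB g).keys = pvKeys g.keys ms := by
  induction ms generalizing g with
  | nil => rfl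
  | cons m ms ih =>
    simp only [List.foldl_cons]
    rw [ih, show (pvStepB g m).keys = PySem.Set.update g.keys (PySem.Dict.ofList m).keys from by
      unfold pvStepB
      rw [PySem.Dict.keys_foldl_modify_key _ Prod.fst _ _,
          show (PySem.Dict.ofList m).items.map Prod.fst = (PySem.Dict.ofList m).keys from rfl]]
    rfl

theorem pv_nodup_groups (ms : List (List (String × Int))) (g : PySem.Dict String (List Int))
    (h : g.keys.Nodup) : (ms.foldl pvStepB g).keys.Nodup := by
  induction ms generalizing g with
  | nil => exact h
  | cons m ms ih =>
    simp only [List.foldl_cons]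
    apply ih
    unfold pvStepB
    exact PySem.Dict.nodup_keys_foldl_modify_key _ Prod.fst _ _ _ h

theorem pv_sum_contrib (ms : List (List (String × Int))) (k : String) :
    (pvContrib ms k).sum = pvTotal ms k := by
  induction ms with
  | nil => simp [pvContrib, pvTotal]
  | cons m ms ih =>
    have ih2 := ih
    rw [pvContrib, pvTotal] at ih2
    rw [pvContrib, List.flatMap_cons, List.sum_append, pvTotal, List.map_cons, List.sum_cons, ih2]
    by_cases hc : (PySem.Dict.ofList m).contains k
    · rw [if_pos hc]
      simp
    · rw [if_neg hc,
          PySem.Dict.getD_of_not_contains _ 0 (by cases h : (PySem.Dict.ofList m).contains k with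
            | true => exact absurd h hc
            | false => rfl)]
      simp

-- ===== VERDICT (by name: the statement is the Claim_ definition above) =====
theorem calculate_total_ingredient_popularities_spec : Claim_equal_calculate_total_ingredient_popularities := by
  intro ms _
  show calculate_total_ingredient_popularities ms = calculate_total_ingredient_popularities_alt ms
  rw [pvA_eq]
  show _ = ((ms.foldl pvStepB PySem.Dict.empty).items.map (fun p => (p.1, p.2.sum)))
  have hne : (PySem.Dict.empty : PySem.Dict String Int).keys.Nodup := by
    simp [PySem.Dict.keys_empty]
  have hndA : (ms.foldl pvStep2 (ms.foldl pvStep1 PySem.Dict.empty)).keys.Nodup :=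
    pv_nodup_step2 _ _ (pv_nodup_step1 _ _ hne)
  have hndG : (ms.foldl pvStepB PySem.Dict.empty).keys.Nodup :=
    pv_nodup_groups _ _ (by simp [PySem.Dict.keys_empty])
  have hkeysA : (ms.foldl pvStep2 (ms.foldl pvStep1 PySem.Dict.empty)).keys
      = pvKeys PySem.Set.empty ms := by
    rw [pv_keys_step2, pv_keys_step1, PySem.Dict.keys_empty]
    exact pv_pvKeys_idem ms _ (fun m hm x hx => pv_mem_pvKeys_of_mem ms _ m hm x hx)
  have hkeysG : (ms.foldl pvStepB PySem.Dict.empty).keys = pvKeys PySem.Set.empty ms := by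
    rw [pv_keys_groups, PySem.Dict.keys_empty]; rfl
  rw [PySem.Dict.items_eq_map_keys _ hndA 0, PySem.Dict.items_eq_map_keys _ hndG ([] : List Int),
      hkeysA, hkeysG, List.map_map]
  refine List.map_congr_left (fun k hk => ?_)
  show (k, (ms.foldl pvStep2 (ms.foldl pvStep1 PySem.Dict.empty)).getD k 0)
      = (k, ((ms.foldl pvStepB PySem.Dict.empty).getD k []).sum)
  rw [pv_getD_step2, pv_getD_step1 ms PySem.Dict.empty k (by simp [PySem.Dict.getD_empty]),
      pv_getD_groups, PySem.Dict.getD_empty, List.nil_append, pv_sum_contrib]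
  simp
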